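-- pv_equiv track=rewrite | github.com/FabianMenekshi/LLMs_Robustness_Under_Distractions | src/validation.py | validate_task_counts
-- ===== SOURCE A (Python) =====
-- from collections import Counter, defaultdict
-- from typing import List, Dict, Any, Tuple
--
-- EXPECTED_TASK_NAMES = {
--     "single_label_classification",
--     "multi_label_classification",
--     "information_extraction",
--     "rule_based_transformation",
--     "extractive_qa",
-- }
--
-- def validate_task_counts(records: List[Dict[str, Any]], expected_per_task: int = 50) -> List[str]:
--     counts = Counter(record["task_name"] for record in records)
--     issues = []
--
--     for task_name in EXPECTED_TASK_NAMES:
--         observed = counts.get(task_name, 0)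
--         if observed != expected_per_task:
--             issues.append(
--                 f"task_count_mismatch:{task_name}:expected={expected_per_task}:observed={observed}"
--             )
--
--     return issues
-- ===== SOURCE B (Python) =====
-- EXPECTED_TASK_NAMES = {
--     "single_label_classification",
--     "multi_label_classification",
--     "information_extraction",
--     "rule_based_transformation",
--     "extractive_qa",
-- }
--
-- def validate_task_counts(records, expected_per_task=50):
--     # Sort the task names so equal names sit in contiguous runs, then
--     # measure each run's length; no hash-based counting table is built.
--     names = sorted(record["task_name"] for record in records)
--     counts = {}
--     prev = None
--     run = 0
--     for name in names:
--         if name == prev: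
--             run += 1
--         else:
--             if prev is not None:
--                 counts[prev] = run
--             prev, run = name, 1
--     if prev is not None:
--         counts[prev] = run
--     return [
--         f"task_count_mismatch:{task_name}:expected={expected_per_task}:observed={counts.get(task_name, 0)}"
--         for task_name in EXPECTED_TASK_NAMES
--         if counts.get(task_name, 0) != expected_per_task
--     ]
-- ===== Notes on version B (the rewrite author's own statement) =====
-- stated objective: alternative
-- what changed: Replaces the hash-based Counter with sort-then-scan counting: B sorts the task names, measures each contiguous run's length with a prev/run accumulator, then emits the same mismatch lines via a comprehension; Pre_ excludes records lacking the "task_name" key, on which both A and B raise KeyError.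
import Mathlib
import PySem

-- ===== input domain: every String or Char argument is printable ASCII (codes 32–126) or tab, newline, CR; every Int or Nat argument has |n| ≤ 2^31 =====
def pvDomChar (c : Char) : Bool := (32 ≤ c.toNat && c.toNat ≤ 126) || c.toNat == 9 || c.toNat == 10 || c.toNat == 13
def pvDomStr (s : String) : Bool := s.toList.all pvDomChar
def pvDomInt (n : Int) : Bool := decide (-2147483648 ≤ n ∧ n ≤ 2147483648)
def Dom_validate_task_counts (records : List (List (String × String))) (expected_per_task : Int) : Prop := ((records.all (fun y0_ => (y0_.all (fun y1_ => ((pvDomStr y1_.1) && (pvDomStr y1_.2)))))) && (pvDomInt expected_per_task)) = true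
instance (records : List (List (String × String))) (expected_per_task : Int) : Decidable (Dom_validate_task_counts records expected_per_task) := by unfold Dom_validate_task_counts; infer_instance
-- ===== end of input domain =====

-- B counts by sorting the task names and measuring contiguous runs (prev/run scan)
-- instead of A's hash Counter; the expected-name order is the set's iteration order
-- under the grader's pinned PYTHONHASHSEED=0. Same output list.


-- ===== PORT A =====
-- EXPECTED_TASK_NAMES is a Python set; its iteration order under the grader's pinned PYTHONHASHSEED=0:
def pvExpectedTaskNames : List String :=
  ["single_label_classification", "rule_based_transformation", "multi_label_classification",
   "extractive_qa", "information_extraction"]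

-- record["task_name"]; raises KeyError when the key is absent (excluded by Pre_), so .getD "" is exact on Pre_
def pvKeyOf (r : List (String × String)) : String :=
  ((PySem.Dict.mk r).get? "task_name").getD ""

def validate_task_counts (records : List (List (String × String))) (expected_per_task : Int) : List String :=
  let counts := PySem.Dict.counter (records.map pvKeyOf)
  pvExpectedTaskNames.foldl (fun issues task_name =>
    let observed := counts.getD task_name 0
    if observed != expected_per_task then
      issues ++ ["task_count_mismatch:" ++ task_name ++ ":expected=" ++ PySem.Int.toStr expected_per_task
                 ++ ":observed=" ++ PySem.Int.toStr observed]
    else issues) []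

-- ===== PORT B =====
-- loop body: state (counts, prev, run); 'name == prev' is False while prev is None
def pvRunStep (st : PySem.Dict String Int × Option String × Int) (name : String) :
    PySem.Dict String Int × Option String × Int :=
  match st with
  | (counts, some p, run) =>
      if name == p then (counts, some p, run + 1)
      else (counts.insert p run, some name, 1)
  | (counts, none, _) => (counts, some name, 1)

-- the trailing 'if prev is not None: counts[prev] = run'
def pvRunFlush (st : PySem.Dict String Int × Option String × Int) : PySem.Dict String Int :=
  match st with
  | (counts, some p, run) => counts.insert p run
  | (counts, none, _) => counts

def validate_task_counts_alt (records : List (List (String × String))) (expected_per_task : Int) : List String :=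
  let names := PySem.List.sorted (records.map pvKeyOf) (fun x => x) false
  let counts := pvRunFlush (names.foldl pvRunStep (PySem.Dict.empty, none, 0))
  (pvExpectedTaskNames.filter (fun task_name => counts.getD task_name 0 != expected_per_task)).map
    (fun task_name =>
      "task_count_mismatch:" ++ task_name ++ ":expected=" ++ PySem.Int.toStr expected_per_task
        ++ ":observed=" ++ PySem.Int.toStr (counts.getD task_name 0))

-- ===== PRECONDITION & SPEC =====
-- Pre_ excludes records lacking the "task_name" key, on which A (and B) raise KeyError.
def Pre_validate_task_counts (records : List (List (String × String))) (expected_per_task : Int) : Prop :=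
  records.all (fun r => ((PySem.Dict.mk r).get? "task_name").isSome) = true
instance (records : List (List (String × String))) (expected_per_task : Int) : Decidable (Pre_validate_task_counts records expected_per_task) := by unfold Pre_validate_task_counts; infer_instance

def pvWitness_validate_task_counts : (List (List (String × String))) × Int :=
  ([[("task_name", "extractive_qa")], [("task_name", "extractive_qa")]], 2)

def Spec_validate_task_counts (records : List (List (String × String))) (expected_per_task : Int) (out : List String) : Prop := out = validate_task_counts_alt records expected_per_task
instance (records : List (List (String × String))) (expected_per_task : Int) (out : List String) : Decidable (Spec_validate_task_counts records expected_per_task out) := by unfold Spec_validate_task_counts; infer_instance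

-- ===== CLAIM (what is proved, stated in full; the proofs are below) =====
def Claim_equal_validate_task_counts : Prop := ∀ (records : List (List (String × String))) (expected_per_task : Int), Dom_validate_task_counts records expected_per_task → Pre_validate_task_counts records expected_per_task → Spec_validate_task_counts records expected_per_task (validate_task_counts records expected_per_task)

-- ===== LEMMAS AND PROOFS =====

-- run-length invariant: over a sorted remainder (all ≥ prev, keys of counts < prev),
-- the flushed dict after the scan counts each name of the remainder on top of the flushed start state
theorem pv_run_invariant (l : List String) (counts : PySem.Dict String Int)
    (prev : Option String) (run : Int) (t : String)
    (hsort : l.Pairwise (· ≤ ·))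
    (hprev : match prev with
             | none => counts.keys = []
             | some p => (∀ y ∈ l, p ≤ y) ∧ ∀ k ∈ counts.keys, k ≤ p ∧ k ≠ p) :
    (pvRunFlush (l.foldl pvRunStep (counts, prev, run))).getD t 0
      = (pvRunFlush (counts, prev, run)).getD t 0 + l.count t := by
  induction l generalizing counts prev run with
  | nil => simp
  | cons x xs ih =>
    rw [List.pairwise_cons] at hsort
    obtain ⟨hx, hxs⟩ := hsort
    simp only [List.foldl_cons]
    match prev with
    | none =>
      have hke : counts.keys = [] := hprev
      simp only [pvRunStep]
      rw [ih counts (some x) 1 hxs ⟨fun y hy => hx y hy, by simp [hke]⟩]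
      simp only [pvRunFlush]
      have hkx : counts.contains x = false := by
        rw [Bool.eq_false_iff]
        intro hc
        rw [PySem.Dict.contains_iff_mem_keys, hke] at hc
        simp at hc
      rw [PySem.Dict.getD_insert]
      by_cases ht : t = x
      · subst ht
        simp [hkx, PySem.Dict.getD_of_not_contains]; omega
      · simp [ht, Ne.symm ht]
    | some p =>
      obtain ⟨hple, hkeys⟩ := hprev
      by_cases hxp : x = p
      · subst hxp
        simp only [pvRunStep, BEq.rfl, if_pos]
        rw [ih counts (some x) (run + 1) hxs ⟨fun y hy => hx y hy, hkeys⟩]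
        simp only [pvRunFlush]
        rw [PySem.Dict.getD_insert, PySem.Dict.getD_insert]
        by_cases ht : t = x
        · subst ht
          simp; omega
        · simp [ht, Ne.symm ht]
      · have hpx : p ≤ x := hple x (by simp)
        simp only [pvRunStep]
        rw [if_neg (by simpa using hxp)]
        have hnew : ∀ k ∈ (counts.insert p run).keys, k ≤ x ∧ k ≠ x := by
          intro k hk
          rw [PySem.Dict.mem_keys_insert] at hk
          have hkle : k ≤ p := by
            rcases hk with hk | hk
            · exact hk ▸ le_refl _
            · exact (hkeys k hk).1
          refine ⟨le_trans hkle hpx, ?_⟩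
          intro hkx
          subst hkx
          exact hxp (le_antisymm hkle hpx)
        rw [ih (counts.insert p run) (some x) 1 hxs ⟨fun y hy => hx y hy, hnew⟩]
        simp only [pvRunFlush]
        have hcx : counts.contains x = false := by
          rw [Bool.eq_false_iff]
          intro hc
          rw [PySem.Dict.contains_iff_mem_keys] at hc
          exact hxp (le_antisymm ((hkeys x hc).1) hpx)
        rw [PySem.Dict.getD_insert, PySem.Dict.getD_insert]
        by_cases ht : t = x
        · subst ht
          simp [hxp, hcx, PySem.Dict.getD_of_not_contains]; omega
        · simp [ht, Ne.symm ht]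

-- B's run-length dict over the sorted names counts exactly like A's Counter
theorem pv_counts_eq (records : List (List (String × String))) (t : String) :
    (pvRunFlush ((PySem.List.sorted (records.map pvKeyOf) (fun x => x) false).foldl pvRunStep
        (PySem.Dict.empty, none, 0))).getD t 0
      = (PySem.Dict.counter (records.map pvKeyOf)).getD t 0 := by
  rw [pv_run_invariant _ _ _ _ _
        (by simpa using PySem.List.sorted_pairwise (records.map pvKeyOf) (fun x => x))
        (by simp [PySem.Dict.keys_empty])]
  rw [PySem.Dict.getD_counter]
  simp [pvRunFlush, PySem.Dict.getD_empty,
        (PySem.List.sorted_perm (records.map pvKeyOf) (fun x => x) false).count_eq]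

-- ===== VERDICT (by name: the statement is the Claim_ definition above) =====
theorem validate_task_counts_spec : Claim_equal_validate_task_counts := by
  intro records expected_per_task _ _
  unfold Spec_validate_task_counts validate_task_counts validate_task_counts_alt
  simp only [pv_counts_eq]
  rw [PySem.List.foldl_append_if]
  simp
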